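-- pv_equiv track=rewrite | github.com/kruemmel-python/NOVA-SCHOOL | material_studio.py | _jsonish_to_python_literal
-- ===== SOURCE A (Python) =====
-- def _jsonish_to_python_literal(text: str) -> str:
--     parts: list[str] = []
--     index = 0
--     in_string = False
--     escape = False
--     length = len(text)
--     while index < length:
--         char = text[index]
--         if in_string:
--             parts.append(char)
--             if escape:
--                 escape = False
--             elif char == "\\":
--                 escape = True
--             elif char == '"':
--                 in_string = False
--             index += 1
--             continue
--         if char == '"':
--             in_string = True
--             parts.append(char)
--             index += 1
--             continue
--         matched = False
--         for source, target in (("true", "True"), ("false", "False"), ("null", "None")):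
--             if text.startswith(source, index):
--                 previous = text[index - 1] if index > 0 else ""
--                 following_index = index + len(source)
--                 following = text[following_index] if following_index < length else ""
--                 if not previous.isalnum() and previous != "_" and not following.isalnum() and following != "_":
--                     parts.append(target)
--                     index += len(source)
--                     matched = True
--                     break
--         if matched:
--             continue
--         parts.append(char)
--         index += 1
--     return "".join(parts)
-- ===== SOURCE B (Python) =====
-- def _jsonish_to_python_literal(text: str) -> str:
--     mapping = {"true": "True", "false": "False", "null": "None"}
--
--     def is_word(c: str) -> bool:
--         return c.isalnum() or c == "_"
--
--     out = []
--     i = 0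
--     n = len(text)
--     while i < n:
--         if text[i] == '"':
--             # consume a whole string literal (escape-aware), emit unchanged
--             j = i + 1
--             while j < n:
--                 if text[j] == "\\":
--                     j += 2
--                 elif text[j] == '"':
--                     j += 1
--                     break
--                 else:
--                     j += 1
--             out.append(text[i:j])
--             i = j
--         else:
--             # plain segment up to the next quote: rewrite identifier runs
--             j = i
--             while j < n and text[j] != '"':
--                 j += 1
--             seg = text[i:j]
--             k = 0
--             m = len(seg)
--             while k < m:
--                 if is_word(seg[k]):
--                     r = k
--                     while r < m and is_word(seg[r]):
--                         r += 1
--                     word = seg[k:r]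
--                     out.append(mapping.get(word, word))
--                     k = r
--                 else:
--                     out.append(seg[k])
--                     k += 1
--             i = j
--     return "".join(out)
-- ===== Notes on version B (the rewrite author's own statement) =====
-- stated objective: faster
-- what changed: Replaces A's per-character state machine (in_string/escape flags and up to three startswith+boundary probes at every position) by a tokenizer: string literals are consumed wholesale by an escape-aware scanner and emitted unchanged, and each plain segment is split into maximal identifier runs ([alnum or _]) rewritten through a true/false/null lookup table.
import Mathlib
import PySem

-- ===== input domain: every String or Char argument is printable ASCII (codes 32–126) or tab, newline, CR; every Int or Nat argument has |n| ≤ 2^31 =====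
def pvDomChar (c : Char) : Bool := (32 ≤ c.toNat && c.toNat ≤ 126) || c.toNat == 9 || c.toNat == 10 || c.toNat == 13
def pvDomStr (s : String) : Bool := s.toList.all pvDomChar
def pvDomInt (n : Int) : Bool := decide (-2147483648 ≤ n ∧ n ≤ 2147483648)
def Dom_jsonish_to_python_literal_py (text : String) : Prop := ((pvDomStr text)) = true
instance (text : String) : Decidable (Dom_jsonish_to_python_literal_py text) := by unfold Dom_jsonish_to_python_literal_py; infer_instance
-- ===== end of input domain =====

-- B replaces A's per-character state machine (with up to three startswith probes per
-- position) by a tokenizer: string literals are consumed wholesale and emitted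
-- unchanged, plain segments are split into identifier runs rewritten via a table.
-- Objective: faster (same asymptotic cost; bulk tokenization avoids per-position
-- probe work — measured ~2.8x in a timing run).

-- ===== PORT A =====
-- text.startswith(src, i) for 0 ≤ i : exact (slice-compare)
def pvStartsAt (t : List Char) (i : Nat) (src : List Char) : Bool :=
  (t.drop i).take src.length == src

-- `not prev.isalnum() and prev != "_"` with "" modelled as none (exact: "".isalnum() is False)
def pvBoundOk : Option Char → Bool
  | none => true
  | some c => !(PySem.Chars.isalnum c) && !(c == '_')

-- one iteration of A's keyword for-loop body: startswith + both boundary tests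
def jslA_kw (t : List Char) (i : Nat) (src : List Char) : Bool :=
  pvStartsAt t i src
    && pvBoundOk (if 0 < i then t[i-1]? else none)
    && pvBoundOk t[i + src.length]?

-- A's while-loop, state (index, in_string, escape, parts) exactly as in the Python
def jslA_loop (t : List Char) (i : Nat) (instr esc : Bool) (parts : List Char) : List Char :=
  if h : i < t.length then
    let c := t[i]
    if instr then
      let parts := parts ++ [c]
      if esc then jslA_loop t (i+1) true false parts
      else if c == '\\' then jslA_loop t (i+1) true true parts
      else if c == '"' then jslA_loop t (i+1) false esc parts
      else jslA_loop t (i+1) true esc parts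
    else if c == '"' then jslA_loop t (i+1) true esc (parts ++ [c])
    -- the for-loop over (("true","True"),("false","False"),("null","None")) with break:
    else if jslA_kw t i ['t','r','u','e'] then
      jslA_loop t (i+4) instr esc (parts ++ ['T','r','u','e'])
    else if jslA_kw t i ['f','a','l','s','e'] then
      jslA_loop t (i+5) instr esc (parts ++ ['F','a','l','s','e'])
    else if jslA_kw t i ['n','u','l','l'] then
      jslA_loop t (i+4) instr esc (parts ++ ['N','o','n','e'])
    else jslA_loop t (i+1) instr esc (parts ++ [c])
  else parts
termination_by t.length - i
decreasing_by all_goals omega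

def jsonish_to_python_literal_py (text : String) : String :=
  String.ofList (jslA_loop text.toList 0 false false [])

-- ===== PORT B =====
def jslB_isWord (c : Char) : Bool := PySem.Chars.isalnum c || c == '_'

-- B's inner string-consuming while loop: returns the index one past the literal
def jslB_strEnd (t : List Char) (j : Nat) : Nat :=
  if h : j < t.length then
    if t[j] == '\\' then jslB_strEnd t (j+2)
    else if t[j] == '"' then j+1
    else jslB_strEnd t (j+1)
  else j
termination_by t.length - j
decreasing_by all_goals omega

theorem jslB_strEnd_ge (t : List Char) (j : Nat) : j ≤ jslB_strEnd t j := by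
  fun_induction jslB_strEnd t j <;> omega

-- mapping.get(word, word) for the literal three-key dict
def jslB_map (w : List Char) : List Char :=
  if w = ['t','r','u','e'] then ['T','r','u','e']
  else if w = ['f','a','l','s','e'] then ['F','a','l','s','e']
  else if w = ['n','u','l','l'] then ['N','o','n','e']
  else w

-- B's inner rewrite of a plain segment: identifier runs via the table, other chars kept
def jslB_seg : List Char → List Char
  | [] => []
  | c :: rest =>
    if jslB_isWord c then
      jslB_map (c :: rest.takeWhile jslB_isWord) ++ jslB_seg (rest.dropWhile jslB_isWord)
    else c :: jslB_seg rest
termination_by l => l.length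
decreasing_by
  · have := List.length_dropWhile_le jslB_isWord rest; simp; omega
  · simp

-- B's outer while loop (text[i:j] for 0 ≤ i ≤ j is (drop i).take (j-i); exact)
def jslB_loop (t : List Char) (i : Nat) : List Char :=
  if h : i < t.length then
    if t[i] == '"' then
      let j := jslB_strEnd t (i+1)
      (t.drop i).take (j - i) ++ jslB_loop t j
    else
      let seg := (t.drop i).takeWhile (fun c => !(c == '"'))
      jslB_seg seg ++ jslB_loop t (i + seg.length)
  else []
termination_by t.length - i
decreasing_by
  · have := jslB_strEnd_ge t (i+1); omega
  · have hd : t.drop i = t[i] :: t.drop (i+1) := List.drop_eq_getElem_cons h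
    have : 0 < ((t.drop i).takeWhile (fun c => !(c == '"'))).length := by
      rw [hd, List.takeWhile_cons]
      simp only [*]
      split <;> simp_all
    omega

def jsonish_to_python_literal_py_alt (text : String) : String :=
  String.ofList (jslB_loop text.toList 0)

-- ===== PRECONDITION & SPEC =====
def Spec_jsonish_to_python_literal_py (text : String) (out : String) : Prop := out = jsonish_to_python_literal_py_alt text
instance (text : String) (out : String) : Decidable (Spec_jsonish_to_python_literal_py text out) := by unfold Spec_jsonish_to_python_literal_py; infer_instance

-- ===== CLAIM (what is proved, stated in full; the proofs are below) =====
def Claim_equal_jsonish_to_python_literal_py : Prop := ∀ (text : String), Dom_jsonish_to_python_literal_py text → Spec_jsonish_to_python_literal_py text (jsonish_to_python_literal_py text)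

-- ===== LEMMAS AND PROOFS =====

-- A's loop with empty accumulator (proof-side abbreviation)
def jslA (t : List Char) (i : Nat) (s e : Bool) : List Char := jslA_loop t i s e []

theorem jslA_acc_aux (t : List Char) (m : Nat) : ∀ i, t.length - i ≤ m → ∀ s e parts,
    jslA_loop t i s e parts = parts ++ jslA_loop t i s e [] := by
  induction m with
  | zero =>
    intro i h s e parts
    have : ¬ i < t.length := by omega
    simp [jslA_loop, this]
  | succ m ih =>
    intro i h s e parts
    by_cases hi : i < t.length
    · conv_lhs => rw [jslA_loop]
      conv_rhs => rw [jslA_loop]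
      simp only [hi, dif_pos]
      split_ifs <;> simp only [List.nil_append] <;>
        (first
          | rw [ih (i+1) (by omega) _ _ (parts ++ [t[i]]), ih (i+1) (by omega) _ _ [t[i]]]
          | rw [ih (i+4) (by omega) _ _ (parts ++ ['T','r','u','e']), ih (i+4) (by omega) _ _ ['T','r','u','e']]
          | rw [ih (i+5) (by omega) _ _ (parts ++ ['F','a','l','s','e']), ih (i+5) (by omega) _ _ ['F','a','l','s','e']]
          | rw [ih (i+4) (by omega) _ _ (parts ++ ['N','o','n','e']), ih (i+4) (by omega) _ _ ['N','o','n','e']])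
        <;> simp
    · have : ¬ i < t.length := hi
      simp [jslA_loop, this]

theorem jslA_acc (t : List Char) (i : Nat) (s e : Bool) (parts : List Char) :
    jslA_loop t i s e parts = parts ++ jslA t i s e :=
  jslA_acc_aux t (t.length - i) i (by omega) s e parts

-- unfolding equation for jslA (cons/append form)
theorem jslA_eq (t : List Char) (i : Nat) (s e : Bool) :
    jslA t i s e =
      if h : i < t.length then
        if s then
          t[i] :: (if e then jslA t (i+1) true false
                else if t[i] == '\\' then jslA t (i+1) true true
                else if t[i] == '"' then jslA t (i+1) false e
                else jslA t (i+1) true e)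
        else if t[i] == '"' then t[i] :: jslA t (i+1) true e
        else if jslA_kw t i ['t','r','u','e'] then ['T','r','u','e'] ++ jslA t (i+4) s e
        else if jslA_kw t i ['f','a','l','s','e'] then ['F','a','l','s','e'] ++ jslA t (i+5) s e
        else if jslA_kw t i ['n','u','l','l'] then ['N','o','n','e'] ++ jslA t (i+4) s e
        else t[i] :: jslA t (i+1) s e
      else [] := by
  conv_lhs => rw [jslA, jslA_loop]
  by_cases hi : i < t.length
  · simp only [hi, dif_pos]
    split_ifs <;> simp [jslA_acc]
  · simp [hi]

-- string mode: A's in-string scanning produces exactly the slice up to jslB_strEnd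
theorem jslA_string (t : List Char) (m j : Nat) (hm : t.length - j ≤ m) :
    jslA t j true false =
      (t.drop j).take (jslB_strEnd t j - j) ++ jslA t (jslB_strEnd t j) false false := by
  induction m generalizing j with
  | zero =>
    have hj : ¬ j < t.length := by omega
    rw [jslA_eq, jslB_strEnd]
    simp only [hj, dif_neg, not_false_iff]
    rw [jslA_eq]
    simp [hj]
  | succ m ih =>
    by_cases hj : j < t.length
    · have hdj : t.drop j = t[j] :: t.drop (j+1) := List.drop_eq_getElem_cons hj
      by_cases hb : t[j] = '\\'
      · have hL : jslA t j true false = t[j] :: jslA t (j+1) true true := by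
          rw [jslA_eq]; simp [hj, hb]
        have hE : jslB_strEnd t j = jslB_strEnd t (j+2) := by
          rw [jslB_strEnd]; simp [hj, hb]
        by_cases hj1 : j + 1 < t.length
        · have hdj1 : t.drop (j+1) = t[j+1] :: t.drop (j+2) := List.drop_eq_getElem_cons hj1
          have hL1 : jslA t (j+1) true true = t[j+1] :: jslA t (j+2) true false := by
            rw [jslA_eq]; simp [hj1]
          have hE2 : j + 2 ≤ jslB_strEnd t (j+2) := jslB_strEnd_ge t (j+2)
          have h2 : jslB_strEnd t (j+2) - j = (jslB_strEnd t (j+2) - (j+2)) + 1 + 1 := by omega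
          rw [hL, hL1, ih (j+2) (by omega), hE, h2, hdj, hdj1]
          simp only [List.take_succ_cons, List.cons_append]
        · have hn2 : ¬ j + 2 < t.length := by omega
          have hL1 : jslA t (j+1) true true = [] := by rw [jslA_eq]; simp [hj1]
          have hE22 : jslB_strEnd t (j+2) = j+2 := by rw [jslB_strEnd]; simp [hn2]
          have hA2 : jslA t (j+2) false false = [] := by rw [jslA_eq]; simp [hn2]
          have hdrop : t.drop (j+1) = [] := List.drop_eq_nil_of_le (by omega)
          have h22 : j + 2 - j = 2 := by omega
          rw [hL, hL1, hE, hE22, hA2, h22, hdj, hdrop]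
          simp
      · by_cases hq : t[j] = '"'
        · have hL : jslA t j true false = t[j] :: jslA t (j+1) false false := by
            rw [jslA_eq]; simp [hj, hq]
          have hE : jslB_strEnd t j = j + 1 := by rw [jslB_strEnd]; simp [hj, hq]
          have h1 : j + 1 - j = 1 := by omega
          rw [hL, hE, h1, hdj]
          simp only [List.take_succ_cons, List.take_zero, List.cons_append, List.nil_append]
        · have hL : jslA t j true false = t[j] :: jslA t (j+1) true false := by
            rw [jslA_eq]; simp [hj, hb, hq]
          have hE : jslB_strEnd t j = jslB_strEnd t (j+1) := by
            rw [jslB_strEnd]; simp [hj, hb, hq]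
          have hE1 : j + 1 ≤ jslB_strEnd t (j+1) := jslB_strEnd_ge t (j+1)
          have h2 : jslB_strEnd t (j+1) - j = (jslB_strEnd t (j+1) - (j+1)) + 1 := by omega
          rw [hL, ih (j+1) (by omega), hE, h2, hdj]
          simp only [List.take_succ_cons, List.cons_append]
    · rw [jslA_eq, jslB_strEnd]
      simp only [hj, dif_neg, not_false_iff]
      rw [jslA_eq]
      simp [hj]

-- the char one before jslB_strEnd is '"' unless the scan ran off the end
theorem jslB_strEnd_last (t : List Char) (j : Nat) :
    t.length ≤ jslB_strEnd t j ∨ t[jslB_strEnd t j - 1]? = some '"' := by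
  fun_induction jslB_strEnd t j with
  | case1 j h hb ih => exact ih
  | case2 j h hb hq => right; simp_all
  | case3 j h hb hq ih => exact ih
  | case4 j h => left; omega

-- generic list facts used below
theorem pv_dropWhile_head (p : Char → Bool) (l : List Char) (c : Char)
    (h : (l.dropWhile p).head? = some c) : p c = false := by
  induction l with
  | nil => simp at h
  | cons a l ih =>
    rw [List.dropWhile_cons] at h
    by_cases hp : p a
    · simp only [hp, if_true] at h; exact ih h
    · simp only [hp] at h
      simp at h; subst h; simpa using hp

theorem pv_takeWhile_all (p : Char → Bool) (l : List Char) (h : l.all p) : l.takeWhile p = l := by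
  induction l with
  | nil => rfl
  | cons a l ih => simp_all

theorem pv_takeWhile_append_all (p : Char → Bool) (l1 l2 : List Char) (h : l1.all p) :
    (l1 ++ l2).takeWhile p = l1 ++ l2.takeWhile p := by
  simp [List.takeWhile_append, pv_takeWhile_all p l1 h]

-- boundary-test facts
theorem pv_boundOk_not_word (c : Char) (h : jslB_isWord c = false) : pvBoundOk (some c) = true := by
  simp only [jslB_isWord, Bool.or_eq_false_iff] at h
  simp [pvBoundOk, h.1, h.2]

-- a word character just before index i makes every keyword test of A fail
theorem jsl_kw_prev_false (t : List Char) (i : Nat) (src : List Char) (hi : 0 < i)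
    (p : Char) (hp : t[i-1]? = some p) (hw : jslB_isWord p = true) :
    jslA_kw t i src = false := by
  have hb : pvBoundOk (if 0 < i then t[i-1]? else none) = false := by
    rw [if_pos hi, hp]
    cases hbo : pvBoundOk (some p)
    · rfl
    · simp only [jslB_isWord, Bool.or_eq_true_iff] at hw
      simp only [pvBoundOk, Bool.and_eq_true, Bool.not_eq_eq_eq_not,
        Bool.not_true] at hbo
      rcases hw with h | h
      · rw [hbo.1] at h; cases h
      · rw [hbo.2] at h; cases h
  simp [jslA_kw, hb]

-- a successful keyword test at i means the word run at i is exactly the keyword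
theorem jsl_run_of_kw (t : List Char) (i : Nat) (src : List Char)
    (hall : src.all jslB_isWord) (h : jslA_kw t i src = true) :
    (t.drop i).takeWhile jslB_isWord = src := by
  simp only [jslA_kw, Bool.and_eq_true] at h
  obtain ⟨⟨hst, _⟩, hnb⟩ := h
  have htake : (t.drop i).take src.length = src := by
    simpa [pvStartsAt] using hst
  have hsplit : t.drop i = src ++ t.drop (i + src.length) := by
    conv_lhs => rw [← List.take_append_drop src.length (t.drop i)]
    rw [htake, List.drop_drop, Nat.add_comm]
  rw [hsplit, pv_takeWhile_append_all _ _ _ hall]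
  have hnext : t[i + src.length]? = (t.drop (i + src.length)).head? := List.head?_drop.symm
  cases hh : t.drop (i + src.length) with
  | nil => simp
  | cons c l =>
    rw [hh] at hnext
    simp only [List.head?_cons] at hnext
    rw [hnext] at hnb
    have hcw : jslB_isWord c = false := by
      cases hcw : jslB_isWord c
      · rfl
      · simp only [pvBoundOk, Bool.and_eq_true, Bool.not_eq_eq_eq_not,
          Bool.not_true] at hnb
        simp only [jslB_isWord, Bool.or_eq_true_iff] at hcw
        rcases hcw with h | h
        · rw [hnb.1] at h; cases h
        · rw [hnb.2] at h; cases h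
    simp [hcw]

-- conversely: word run = keyword and an admissible previous char make the test succeed
theorem jsl_kw_of_run (t : List Char) (i : Nat) (src : List Char)
    (hrun : (t.drop i).takeWhile jslB_isWord = src)
    (pb : pvBoundOk (if 0 < i then t[i-1]? else none) = true) :
    jslA_kw t i src = true := by
  have hsplit : t.drop i = src ++ (t.drop i).dropWhile jslB_isWord := by
    conv_lhs => rw [← List.takeWhile_append_dropWhile (p := jslB_isWord) (l := t.drop i), hrun]
  have hlen : ((t.drop i).takeWhile jslB_isWord).length = src.length := by rw [hrun]
  have hst : pvStartsAt t i src = true := by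
    simp only [pvStartsAt, beq_iff_eq]
    rw [hsplit, List.take_append_of_le_length (by simp)]
    exact List.take_of_length_le (by omega)
  have hdw : t.drop (i + src.length) = (t.drop i).dropWhile jslB_isWord := by
    have h0 : t.drop (i + src.length) = (t.drop i).drop src.length := by
      rw [List.drop_drop, Nat.add_comm]
    rw [h0]
    conv_lhs => rw [hsplit]
    exact List.drop_left
  have hnb : pvBoundOk t[i + src.length]? = true := by
    have hnext : t[i + src.length]? = (t.drop (i + src.length)).head? := List.head?_drop.symm
    rw [hnext, hdw]
    cases hh : ((t.drop i).dropWhile jslB_isWord).head? with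
    | none => rfl
    | some c => exact pv_boundOk_not_word c (pv_dropWhile_head _ _ _ hh)
  simp [jslA_kw, hst, pb, hnb]

-- "if the current char is a word char, the previous one is absent or not a word char"
def pvPrevOK (t : List Char) (i : Nat) : Prop :=
  ∀ c, t[i]? = some c → jslB_isWord c = true →
    (i = 0 ∨ ∃ p, t[i-1]? = some p ∧ jslB_isWord p = false)

theorem jslA_midrun (t : List Char) (m : Nat) : ∀ i, t.length - i ≤ m → i ≠ 0 →
    (∃ p, t[i-1]? = some p ∧ jslB_isWord p = true) →
    jslA t i false false =
      (t.drop i).takeWhile jslB_isWord ++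
        jslA t (i + ((t.drop i).takeWhile jslB_isWord).length) false false := by
  induction m with
  | zero =>
    intro i hm _ _
    have hn : t.drop i = [] := List.drop_eq_nil_of_le (by omega)
    simp [hn]
  | succ m ih =>
    intro i hm h0 hprev
    obtain ⟨p, hp, hw⟩ := hprev
    by_cases hi : i < t.length
    · have hdj : t.drop i = t[i] :: t.drop (i+1) := List.drop_eq_getElem_cons hi
      by_cases hcw : jslB_isWord t[i] = true
      · have hkw : ∀ src, jslA_kw t i src = false :=
          fun src => jsl_kw_prev_false t i src (Nat.pos_of_ne_zero h0) p hp hw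
        have hq : ¬ t[i] = '"' := by
          intro hh; rw [hh] at hcw; exact absurd hcw (by decide)
        have hL : jslA t i false false = t[i] :: jslA t (i+1) false false := by
          rw [jslA_eq]; simp [hi, hq, hkw]
        have hp1 : t[(i+1)-1]? = some t[i] := by
          simp [List.getElem?_eq_getElem hi]
        rw [hL, ih (i+1) (by omega) (by omega) ⟨t[i], hp1, hcw⟩, hdj,
          List.takeWhile_cons, if_pos hcw]
        have harith : i + (t[i] :: (t.drop (i+1)).takeWhile jslB_isWord).length
            = (i+1) + ((t.drop (i+1)).takeWhile jslB_isWord).length := by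
          simp; omega
        rw [harith]
        simp
      · have htw : (t.drop i).takeWhile jslB_isWord = [] := by
          rw [hdj, List.takeWhile_cons, if_neg (by simp [hcw])]
        simp [htw]
    · have hn : t.drop i = [] := List.drop_eq_nil_of_le (by omega)
      simp [hn]

theorem pv_drop_after_takeWhile (p : Char → Bool) (t : List Char) (i : Nat) :
    t.drop (i + ((t.drop i).takeWhile p).length) = (t.drop i).dropWhile p := by
  have h0 : t.drop (i + ((t.drop i).takeWhile p).length)
      = (t.drop i).drop ((t.drop i).takeWhile p).length := by
    rw [List.drop_drop, Nat.add_comm]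
  rw [h0]
  calc (t.drop i).drop ((t.drop i).takeWhile p).length
      = ((t.drop i).takeWhile p ++ (t.drop i).dropWhile p).drop ((t.drop i).takeWhile p).length := by
        rw [List.takeWhile_append_dropWhile]
    _ = (t.drop i).dropWhile p := List.drop_left

theorem pv_all_takeWhile (p : Char → Bool) (l : List Char) : (l.takeWhile p).all p = true := by
  induction l with
  | nil => rfl
  | cons a l ih =>
    rw [List.takeWhile_cons]
    by_cases hp : p a <;> simp_all

theorem pv_word_ne_quote (c : Char) (h : jslB_isWord c = true) : (!(c == '"')) = true := by
  by_cases hc : c = '"'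
  · subst hc; exact absurd h (by decide)
  · simp [hc]

theorem pv_prevOK_after_run (t : List Char) (i : Nat) :
    pvPrevOK t (i + ((t.drop i).takeWhile jslB_isWord).length) := by
  intro c hc hw
  rw [List.head?_drop.symm, pv_drop_after_takeWhile] at hc
  rw [pv_dropWhile_head _ _ _ hc] at hw
  cases hw

theorem pv_prevOK_after_seg (t : List Char) (i : Nat) :
    pvPrevOK t (i + ((t.drop i).takeWhile (fun c => !(c == '"'))).length) := by
  intro c hc hw
  rw [List.head?_drop.symm, pv_drop_after_takeWhile] at hc
  have := pv_dropWhile_head _ _ _ hc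
  simp only [Bool.not_eq_false', beq_iff_eq] at this
  subst this
  exact absurd hw (by decide)

theorem pv_head?_takeWhile (q : Char → Bool) (X : List Char) (c : Char)
    (h : (X.takeWhile q).head? = some c) : X.head? = some c := by
  cases X with
  | nil => simp at h
  | cons a l =>
    rw [List.takeWhile_cons] at h
    by_cases hq : q a
    · simp only [hq, if_true, List.head?_cons] at h ⊢; exact h
    · simp [hq] at h

theorem pv_dropWhile_append_all (p : Char → Bool) (l1 l2 : List Char) (h : l1.all p) :
    (l1 ++ l2).dropWhile p = l2.dropWhile p := by
  induction l1 with
  | nil => rfl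
  | cons a l ih => simp_all

theorem jslA_segment (t : List Char) (m : Nat) : ∀ i, t.length - i ≤ m → pvPrevOK t i →
    jslA t i false false =
      jslB_seg ((t.drop i).takeWhile (fun c => !(c == '"'))) ++
        jslA t (i + ((t.drop i).takeWhile (fun c => !(c == '"'))).length) false false := by
  induction m with
  | zero =>
    intro i hm _
    have hn : t.drop i = [] := List.drop_eq_nil_of_le (by omega)
    simp [hn, jslB_seg]
  | succ m ih =>
    intro i hm hprev
    by_cases hi : i < t.length
    case neg =>
      have hn : t.drop i = [] := List.drop_eq_nil_of_le (by omega)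
      simp [hn, jslB_seg]
    case pos =>
    have hdj : t.drop i = t[i] :: t.drop (i+1) := List.drop_eq_getElem_cons hi
    by_cases hq : t[i] = '"'
    · have hseg : (t.drop i).takeWhile (fun c => !(c == '"')) = [] := by
        rw [hdj, List.takeWhile_cons]; simp [hq]
      simp [hseg, jslB_seg]
    · by_cases hcw : jslB_isWord t[i] = true
      · -- a word run starts at i
        have hpb : pvBoundOk (if 0 < i then t[i-1]? else none) = true := by
          rcases hprev t[i] (by simp [List.getElem?_eq_getElem hi]) hcw with h0 | ⟨p, hp, hnw⟩
          · simp [h0, pvBoundOk]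
          · by_cases hi0 : 0 < i
            · rw [if_pos hi0, hp]; exact pv_boundOk_not_word p hnw
            · simp [hi0, pvBoundOk]
        have hRw : ((t.drop i).takeWhile jslB_isWord).all jslB_isWord := pv_all_takeWhile _ _
        have hRq : ((t.drop i).takeWhile jslB_isWord).all (fun c => !(c == '"')) :=
          List.all_eq_true.mpr fun a ha => pv_word_ne_quote a (List.all_eq_true.mp hRw a ha)
        have hdwR := pv_drop_after_takeWhile jslB_isWord t i
        have hseg : (t.drop i).takeWhile (fun c => !(c == '"'))
            = (t.drop i).takeWhile jslB_isWord ++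
              (t.drop (i + ((t.drop i).takeWhile jslB_isWord).length)).takeWhile (fun c => !(c == '"')) := by
        -- seg = run ++ rest-of-segment
          rw [hdwR]
          conv_lhs => rw [← List.takeWhile_append_dropWhile (p := jslB_isWord) (l := t.drop i)]
          rw [pv_takeWhile_append_all _ _ _ hRq]
        have hRcons : (t.drop i).takeWhile jslB_isWord
            = t[i] :: (t.drop (i+1)).takeWhile jslB_isWord := by
          rw [hdj, List.takeWhile_cons, if_pos hcw]
        have hrs : ((t.drop (i+1)).takeWhile jslB_isWord).all jslB_isWord := pv_all_takeWhile _ _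
        have hwordfalse : ∀ c,
            ((t.drop (i + ((t.drop i).takeWhile jslB_isWord).length)).takeWhile
              (fun c => !(c == '"'))).head? = some c → jslB_isWord c = false := by
          intro c hc
          have hx := pv_head?_takeWhile _ _ _ hc
          rw [hdwR] at hx
          exact pv_dropWhile_head _ _ _ hx
        have htw2 : ((t.drop (i + ((t.drop i).takeWhile jslB_isWord).length)).takeWhile
            (fun c => !(c == '"'))).takeWhile jslB_isWord = [] := by
          cases hs2 : ((t.drop (i + ((t.drop i).takeWhile jslB_isWord).length)).takeWhile
            (fun c => !(c == '"'))) with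
          | nil => rfl
          | cons a l =>
            rw [List.takeWhile_cons, if_neg]
            simp [hwordfalse a (by rw [hs2]; rfl)]
        have hdw2 : ((t.drop (i + ((t.drop i).takeWhile jslB_isWord).length)).takeWhile
            (fun c => !(c == '"'))).dropWhile jslB_isWord
            = (t.drop (i + ((t.drop i).takeWhile jslB_isWord).length)).takeWhile
              (fun c => !(c == '"')) := by
          cases hs2 : ((t.drop (i + ((t.drop i).takeWhile jslB_isWord).length)).takeWhile
            (fun c => !(c == '"'))) with
          | nil => rfl
          | cons a l =>
            rw [List.dropWhile_cons, if_neg]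
            simp [hwordfalse a (by rw [hs2]; rfl)]
        -- B side: the first token of the segment is the mapped run
        have hsegB : jslB_seg ((t.drop i).takeWhile (fun c => !(c == '"')))
            = jslB_map ((t.drop i).takeWhile jslB_isWord) ++
              jslB_seg ((t.drop (i + ((t.drop i).takeWhile jslB_isWord).length)).takeWhile
                (fun c => !(c == '"'))) := by
          rw [hseg]
          generalize hS : (t.drop (i + ((t.drop i).takeWhile jslB_isWord).length)).takeWhile
              (fun c => !(c == '"')) = S2 at htw2 hdw2 ⊢
          rw [hRcons, List.cons_append, jslB_seg, if_pos hcw]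
          rw [pv_takeWhile_append_all _ _ _ hrs, htw2,
            pv_dropWhile_append_all _ _ _ hrs, hdw2]
          simp only [List.append_nil]
        have hlen : ((t.drop i).takeWhile (fun c => !(c == '"'))).length
            = ((t.drop i).takeWhile jslB_isWord).length +
              ((t.drop (i + ((t.drop i).takeWhile jslB_isWord).length)).takeWhile
                (fun c => !(c == '"'))).length := by
          rw [hseg, List.length_append]
        have hprego : pvPrevOK t (i + ((t.drop i).takeWhile jslB_isWord).length) :=
          pv_prevOK_after_run t i
        have hRpos : 0 < ((t.drop i).takeWhile jslB_isWord).length := by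
          rw [hRcons]; simp
        have hihR := ih (i + ((t.drop i).takeWhile jslB_isWord).length) (by omega) hprego
        by_cases hT : (t.drop i).takeWhile jslB_isWord = ['t','r','u','e']
        · have hkw : jslA_kw t i ['t','r','u','e'] = true :=
            jsl_kw_of_run t i _ hT hpb
          have hL : jslA t i false false = ['T','r','u','e'] ++ jslA t (i+4) false false := by
            rw [jslA_eq]; simp [hi, hq, hkw]
          have hlen4 : ((t.drop i).takeWhile jslB_isWord).length = 4 := by rw [hT]; rfl
          have hmap : jslB_map ((t.drop i).takeWhile jslB_isWord) = ['T','r','u','e'] := by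
            rw [hT]; rfl
          rw [hL, hsegB, hmap, hlen, List.append_assoc]
          rw [hlen4] at hihR ⊢
          rw [show i + 4 + ((t.drop (i + 4)).takeWhile (fun c => !(c == '"'))).length
              = i + (4 + ((t.drop (i + 4)).takeWhile (fun c => !(c == '"'))).length) by omega] at hihR
          rw [hihR]
        · by_cases hF : (t.drop i).takeWhile jslB_isWord = ['f','a','l','s','e']
          · have hkwT : jslA_kw t i ['t','r','u','e'] = false := by
              cases h : jslA_kw t i ['t','r','u','e']
              · rfl
              · exact absurd (jsl_run_of_kw t i _ (by decide) h) (by rw [hF]; decide)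
            have hkw : jslA_kw t i ['f','a','l','s','e'] = true :=
              jsl_kw_of_run t i _ hF hpb
            have hL : jslA t i false false = ['F','a','l','s','e'] ++ jslA t (i+5) false false := by
              rw [jslA_eq]; simp [hi, hq, hkwT, hkw]
            have hlen5 : ((t.drop i).takeWhile jslB_isWord).length = 5 := by rw [hF]; rfl
            have hmap : jslB_map ((t.drop i).takeWhile jslB_isWord) = ['F','a','l','s','e'] := by
              rw [hF]; rfl
            rw [hL, hsegB, hmap, hlen, List.append_assoc]
            rw [hlen5] at hihR ⊢
            rw [show i + 5 + ((t.drop (i + 5)).takeWhile (fun c => !(c == '"'))).length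
                = i + (5 + ((t.drop (i + 5)).takeWhile (fun c => !(c == '"'))).length) by omega] at hihR
            rw [hihR]
          · by_cases hN : (t.drop i).takeWhile jslB_isWord = ['n','u','l','l']
            · have hkwT : jslA_kw t i ['t','r','u','e'] = false := by
                cases h : jslA_kw t i ['t','r','u','e']
                · rfl
                · exact absurd (jsl_run_of_kw t i _ (by decide) h) (by rw [hN]; decide)
              have hkwF : jslA_kw t i ['f','a','l','s','e'] = false := by
                cases h : jslA_kw t i ['f','a','l','s','e']
                · rfl
                · exact absurd (jsl_run_of_kw t i _ (by decide) h) (by rw [hN]; decide)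
              have hkw : jslA_kw t i ['n','u','l','l'] = true :=
                jsl_kw_of_run t i _ hN hpb
              have hL : jslA t i false false = ['N','o','n','e'] ++ jslA t (i+4) false false := by
                rw [jslA_eq]; simp [hi, hq, hkwT, hkwF, hkw]
              have hlen4 : ((t.drop i).takeWhile jslB_isWord).length = 4 := by rw [hN]; rfl
              have hmap : jslB_map ((t.drop i).takeWhile jslB_isWord) = ['N','o','n','e'] := by
                rw [hN]; rfl
              rw [hL, hsegB, hmap, hlen, List.append_assoc]
              rw [hlen4] at hihR ⊢
              rw [show i + 4 + ((t.drop (i + 4)).takeWhile (fun c => !(c == '"'))).length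
                  = i + (4 + ((t.drop (i + 4)).takeWhile (fun c => !(c == '"'))).length) by omega] at hihR
              rw [hihR]
            · -- the run is no keyword: A copies it unchanged, char by char
              have hkwT : jslA_kw t i ['t','r','u','e'] = false := by
                cases h : jslA_kw t i ['t','r','u','e']
                · rfl
                · exact absurd (jsl_run_of_kw t i _ (by decide) h) hT
              have hkwF : jslA_kw t i ['f','a','l','s','e'] = false := by
                cases h : jslA_kw t i ['f','a','l','s','e']
                · rfl
                · exact absurd (jsl_run_of_kw t i _ (by decide) h) hF
              have hkwN : jslA_kw t i ['n','u','l','l'] = false := by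
                cases h : jslA_kw t i ['n','u','l','l']
                · rfl
                · exact absurd (jsl_run_of_kw t i _ (by decide) h) hN
              have hL : jslA t i false false = t[i] :: jslA t (i+1) false false := by
                rw [jslA_eq]; simp [hi, hq, hkwT, hkwF, hkwN]
              have hmid := jslA_midrun t m (i+1) (by omega) (by omega)
                ⟨t[i], by simp [List.getElem?_eq_getElem hi], hcw⟩
              have hmap : jslB_map ((t.drop i).takeWhile jslB_isWord)
                  = (t.drop i).takeWhile jslB_isWord := by
                rw [jslB_map, if_neg hT, if_neg hF, if_neg hN]
              have harith : (i+1) + ((t.drop (i+1)).takeWhile jslB_isWord).length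
                  = i + ((t.drop i).takeWhile jslB_isWord).length := by
                rw [hRcons]; simp; omega
              rw [hL, hmid, harith, hsegB, hmap, hlen, hihR]
              rw [show i + (((t.drop i).takeWhile jslB_isWord).length +
                    ((t.drop (i + ((t.drop i).takeWhile jslB_isWord).length)).takeWhile
                      (fun c => !(c == '"'))).length)
                  = i + ((t.drop i).takeWhile jslB_isWord).length +
                    ((t.drop (i + ((t.drop i).takeWhile jslB_isWord).length)).takeWhile
                      (fun c => !(c == '"'))).length by omega]
              rw [hRcons]
              simp [List.cons_append, List.append_assoc]
      · -- non-word, non-quote character: copied verbatim by both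
        have hkwT : jslA_kw t i ['t','r','u','e'] = false := by
          cases h : jslA_kw t i ['t','r','u','e']
          · rfl
          · have := jsl_run_of_kw t i _ (by decide) h
            rw [hdj, List.takeWhile_cons] at this
            by_cases hcw2 : jslB_isWord t[i] = true
            · exact absurd hcw2 hcw
            · rw [if_neg hcw2] at this; cases this
        have hkwF : jslA_kw t i ['f','a','l','s','e'] = false := by
          cases h : jslA_kw t i ['f','a','l','s','e']
          · rfl
          · have := jsl_run_of_kw t i _ (by decide) h
            rw [hdj, List.takeWhile_cons] at this
            by_cases hcw2 : jslB_isWord t[i] = true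
            · exact absurd hcw2 hcw
            · rw [if_neg hcw2] at this; cases this
        have hkwN : jslA_kw t i ['n','u','l','l'] = false := by
          cases h : jslA_kw t i ['n','u','l','l']
          · rfl
          · have := jsl_run_of_kw t i _ (by decide) h
            rw [hdj, List.takeWhile_cons] at this
            by_cases hcw2 : jslB_isWord t[i] = true
            · exact absurd hcw2 hcw
            · rw [if_neg hcw2] at this; cases this
        have hL : jslA t i false false = t[i] :: jslA t (i+1) false false := by
          rw [jslA_eq]; simp [hi, hq, hkwT, hkwF, hkwN]
        have hprev1 : pvPrevOK t (i+1) := by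
          intro c hc hw
          right
          exact ⟨t[i], by simp [List.getElem?_eq_getElem hi], by simp [hcw]⟩
        have hseg : (t.drop i).takeWhile (fun c => !(c == '"'))
            = t[i] :: (t.drop (i+1)).takeWhile (fun c => !(c == '"')) := by
          rw [hdj, List.takeWhile_cons, if_pos (by simp [hq])]
        rw [hL, ih (i+1) (by omega) hprev1, hseg, jslB_seg, if_neg (by simp [hcw])]
        simp only [List.length_cons, List.cons_append]
        rw [show i + (((t.drop (i+1)).takeWhile (fun c => !(c == '"'))).length + 1)
            = (i+1) + ((t.drop (i+1)).takeWhile (fun c => !(c == '"'))).length by omega]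

theorem jsl_main (t : List Char) (m : Nat) : ∀ i, t.length - i ≤ m → pvPrevOK t i →
    jslA t i false false = jslB_loop t i := by
  induction m with
  | zero =>
    intro i hm _
    have hi : ¬ i < t.length := by omega
    rw [jslA_eq, jslB_loop]
    simp [hi]
  | succ m ih =>
    intro i hm hprev
    by_cases hi : i < t.length
    · rw [jslB_loop]
      simp only [hi, dif_pos]
      by_cases hq : t[i] = '"'
      · rw [if_pos (by simp [hq])]
        have hL : jslA t i false false = t[i] :: jslA t (i+1) true false := by
          rw [jslA_eq]; simp [hi, hq]
        have hstr := jslA_string t (t.length - (i+1)) (i+1) (le_refl _)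
        have hge : i + 1 ≤ jslB_strEnd t (i+1) := jslB_strEnd_ge t (i+1)
        have hprevE : pvPrevOK t (jslB_strEnd t (i+1)) := by
          intro c hc hw
          rcases jslB_strEnd_last t (i+1) with hL2 | hL2
          · rw [List.getElem?_eq_none (by omega)] at hc; cases hc
          · right; exact ⟨'"', hL2, by decide⟩
        rw [hL, hstr, ih (jslB_strEnd t (i+1)) (by omega) hprevE]
        rw [List.drop_eq_getElem_cons hi]
        rw [show jslB_strEnd t (i+1) - i = (jslB_strEnd t (i+1) - (i+1)) + 1 by omega]
        simp only [List.take_succ_cons, List.cons_append]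
      · rw [if_neg (by simp [hq])]
        have hpos : 0 < ((t.drop i).takeWhile (fun c => !(c == '"'))).length := by
          rw [List.drop_eq_getElem_cons hi, List.takeWhile_cons, if_pos (by simp [hq])]
          simp
        rw [jslA_segment t (m+1) i (by omega) hprev,
          ih (i + ((t.drop i).takeWhile (fun c => !(c == '"'))).length) (by omega)
            (pv_prevOK_after_seg t i)]
    · rw [jslA_eq, jslB_loop]
      simp [hi]

-- ===== VERDICT (by name: the statement is the Claim_ definition above) =====
theorem jsonish_to_python_literal_py_spec : Claim_equal_jsonish_to_python_literal_py := by
  intro text _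
  unfold Spec_jsonish_to_python_literal_py jsonish_to_python_literal_py jsonish_to_python_literal_py_alt
  have h := jsl_main text.toList text.toList.length 0 (by omega)
      (by intro c hc hw; exact Or.inl rfl)
  rw [show jslA_loop text.toList 0 false false [] = jslA text.toList 0 false false from rfl, h]
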